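-- pv_equiv track=rewrite | github.com/permCoding/ege-22-23 | tasks/23/8508.py | get
-- ===== SOURCE A (Python) =====
-- def get(n, k):
--     if n > k:return 0
--     if n == 12:return 0
--     if n == k: return 1
--     a = get(n+1, k)
--     b = get(n+2, k)
--     c = get(n*2, k)
--     return a+b+c
-- ===== SOURCE B (Python) =====
-- def get(n, k):
--     if n > k: return 0
--     if n == 12: return 0
--     if n == k: return 1
--     ways = {}
--
--     def val(m):
--         if m > k: return 0
--         if m == 12: return 0
--         if m == k: return 1
--         return ways[m]
--
--     for m in range(k - 1, n - 1, -1):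
--         if m == 12:
--             ways[m] = 0
--         else:
--             ways[m] = val(m + 1) + val(m + 2) + val(2 * m)
--     return ways[n]
-- ===== Notes on version B (the rewrite author's own statement) =====
-- stated objective: alternative
-- what changed: Replaces the naive ternary recursion with a bottom-up dynamic program that fills a table of path counts from k-1 down to n in one pass.
import Mathlib
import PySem

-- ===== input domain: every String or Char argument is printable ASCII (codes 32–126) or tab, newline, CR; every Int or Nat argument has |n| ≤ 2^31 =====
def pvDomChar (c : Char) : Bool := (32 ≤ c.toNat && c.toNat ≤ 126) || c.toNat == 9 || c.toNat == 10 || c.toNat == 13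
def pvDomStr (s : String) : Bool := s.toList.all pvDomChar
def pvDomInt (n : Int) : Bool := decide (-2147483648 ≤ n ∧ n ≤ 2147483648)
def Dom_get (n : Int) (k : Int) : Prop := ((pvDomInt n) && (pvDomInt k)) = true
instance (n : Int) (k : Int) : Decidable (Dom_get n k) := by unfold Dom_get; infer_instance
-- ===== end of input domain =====

-- B replaces A's ternary recursion by a bottom-up DP table filled from k-1 down to n; proved equal on all inputs where A terminates.

-- ===== PORT A =====
-- A's recursion does not terminate for every Int input (it diverges when n ≤ 0 < k - n),
-- so the port carries a fuel parameter; (k-n).toNat + 1 fuel is exact on Pre_get (proved below).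
def getFuel : Nat → Int → Int → Int
  | 0, _, _ => 0
  | f + 1, n, k =>
    if n > k then 0
    else if n = 12 then 0
    else if n = k then 1
    else getFuel f (n + 1) k + getFuel f (n + 2) k + getFuel f (n * 2) k

def get (n : Int) (k : Int) : Int := getFuel ((k - n).toNat + 1) n k

-- ===== PORT B =====
-- B's helper val(m): value of an already-computed state (dict lookup ported as getD,
-- exact on Pre_get where the key is always present).
def altVal (k : Int) (d : PySem.Dict Int Int) (m : Int) : Int :=
  if m > k then 0 else if m = 12 then 0 else if m = k then 1 else d.getD m 0

def altStep (k : Int) (d : PySem.Dict Int Int) (m : Int) : PySem.Dict Int Int :=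
  if m = 12 then d.insert m 0
  else d.insert m (altVal k d (m + 1) + altVal k d (m + 2) + altVal k d (2 * m))

def get_alt (n : Int) (k : Int) : Int :=
  if n > k then 0
  else if n = 12 then 0
  else if n = k then 1
  else
    let ways := (PySem.List.pyRange (k - 1) (n - 1) (-1)).foldl (altStep k) PySem.Dict.empty
    ways.getD n 0

-- ===== PRECONDITION & SPEC =====
-- Pre_ excludes exactly the inputs with n ≤ 0 and n < k, on which A never returns
-- (infinite recursion through n*2, a RecursionError); B raises KeyError there too.
def Pre_get (n : Int) (k : Int) : Prop := 1 ≤ n ∨ k ≤ n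
instance (n : Int) (k : Int) : Decidable (Pre_get n k) := by unfold Pre_get; infer_instance
def pvWitness_get : Int × Int := (1, 10)

def Spec_get (n : Int) (k : Int) (out : Int) : Prop := out = get_alt n k
instance (n : Int) (k : Int) (out : Int) : Decidable (Spec_get n k out) := by unfold Spec_get; infer_instance

-- ===== CLAIM (what is proved, stated in full; the proofs are below) =====
def Claim_equal_get : Prop := ∀ (n : Int) (k : Int), Dom_get n k → Pre_get n k → Spec_get n k (get n k)

-- ===== LEMMAS AND PROOFS =====

theorem getFuel_stable : ∀ (d : Nat) (n k : Int) (f g : Nat), 1 ≤ n → (k - n).toNat ≤ d →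
    (k - n).toNat < f → (k - n).toNat < g → getFuel f n k = getFuel g n k := by
  intro d
  induction d using Nat.strong_induction_on with
  | _ d ih =>
    intro n k f g h1 hd hf hg
    obtain ⟨f', rfl⟩ : ∃ f', f = f' + 1 := ⟨f - 1, by omega⟩
    obtain ⟨g', rfl⟩ : ∃ g', g = g' + 1 := ⟨g - 1, by omega⟩
    by_cases hgt : n > k
    · simp [getFuel, hgt]
    · by_cases h12 : n = 12
      · simp [getFuel, h12]
      · by_cases heq : n = k
        · simp [getFuel, heq]
        · have hlt : n < k := by omega
          have hdpos : 1 ≤ (k - n).toNat := by omega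
          simp only [getFuel, if_neg (by omega : ¬ n > k), if_neg h12, if_neg heq]
          have e1 := ih ((k - n).toNat - 1) (by omega) (n + 1) k f' g' (by omega)
            (by omega) (by omega) (by omega)
          have e2 := ih ((k - n).toNat - 1) (by omega) (n + 2) k f' g' (by omega)
            (by omega) (by omega) (by omega)
          have e3 := ih ((k - n).toNat - 1) (by omega) (n * 2) k f' g' (by omega)
            (by omega) (by omega) (by omega)
          rw [e1, e2, e3]

theorem getFuel_succ (f : Nat) (n k : Int) :
    getFuel (f + 1) n k = if n > k then 0 else if n = 12 then 0 else if n = k then 1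
      else getFuel f (n + 1) k + getFuel f (n + 2) k + getFuel f (n * 2) k := rfl

theorem get_of_gt (n k : Int) (h : k < n) : get n k = 0 := by
  show getFuel ((k - n).toNat + 1) n k = 0
  simp [getFuel, h]

theorem get_of_12 (k : Int) : get 12 k = 0 := by
  show getFuel ((k - 12).toNat + 1) 12 k = 0
  by_cases h : (12 : Int) > k <;> simp [getFuel, h]

theorem get_of_eq (n : Int) (h : n ≠ 12) : get n n = 1 := by
  show getFuel ((n - n).toNat + 1) n n = 1
  simp [getFuel, h]

theorem get_unfold (n k : Int) (h1 : 1 ≤ n) (hlt : n < k) (h12 : n ≠ 12) :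
    get n k = get (n + 1) k + get (n + 2) k + get (n * 2) k := by
  show getFuel ((k - n).toNat + 1) n k = _
  obtain ⟨f, hfe⟩ : ∃ f, (k - n).toNat = f + 1 := ⟨(k - n).toNat - 1, by omega⟩
  rw [hfe, getFuel_succ (f + 1) n k]
  simp only [if_neg (by omega : ¬ n > k), if_neg h12, if_neg (by omega : ¬ n = k)]
  rw [getFuel_stable (f + 1) (n + 1) k (f + 1) ((k - (n + 1)).toNat + 1) (by omega) (by omega)
        (by omega) (by omega),
      getFuel_stable (f + 1) (n + 2) k (f + 1) ((k - (n + 2)).toNat + 1) (by omega) (by omega)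
        (by omega) (by omega),
      getFuel_stable (f + 1) (n * 2) k (f + 1) ((k - (n * 2)).toNat + 1) (by omega) (by omega)
        (by omega) (by omega)]
  rfl

theorem pyRange_neg_one_snoc (a b : Int) (h : b < a) :
    PySem.List.pyRange a b (-1) = PySem.List.pyRange a (b + 1) (-1) ++ [b + 1] := by
  rw [PySem.List.pyRange_neg_one_eq_reverse, PySem.List.pyRange_one_cons (by omega : b + 1 < a + 1),
      List.reverse_cons, PySem.List.pyRange_neg_one_eq_reverse]

theorem fold_inv (k : Int) : ∀ (d : Nat) (t : Int), 1 ≤ t → (k - t).toNat ≤ d →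
    ∀ j : Int, t ≤ j → j < k →
      ((PySem.List.pyRange (k - 1) (t - 1) (-1)).foldl (altStep k) PySem.Dict.empty).get? j
        = some (get j k) := by
  intro d
  induction d using Nat.strong_induction_on with
  | _ d ih =>
    intro t h1 hd j hj1 hj2
    have htk : t < k := by omega
    rw [pyRange_neg_one_snoc (k - 1) (t - 1) (by omega)]
    rw [show (t : Int) - 1 + 1 = t by ring, List.foldl_append, List.foldl_cons, List.foldl_nil]
    set Dn := (PySem.List.pyRange (k - 1) t (-1)).foldl (altStep k) PySem.Dict.empty with hDn
    have ihDn : ∀ m : Int, t + 1 ≤ m → m < k → Dn.get? m = some (get m k) := by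
      intro m hm1 hm2
      have := ih ((k - t).toNat - 1) (by omega) (t + 1) (by omega) (by omega) m hm1 hm2
      rwa [show (t : Int) + 1 - 1 = t by ring] at this
    have hval : ∀ m : Int, t + 1 ≤ m → altVal k Dn m = get m k := by
      intro m hm
      by_cases hgt : m > k
      · rw [altVal, if_pos hgt, get_of_gt m k hgt]
      · by_cases h12 : m = 12
        · rw [altVal, if_neg hgt, if_pos h12, h12, get_of_12]
        · by_cases heq : m = k
          · rw [altVal, if_neg hgt, if_neg h12, if_pos heq, heq,
                get_of_eq k (by omega : k ≠ 12)]
          · rw [altVal, if_neg hgt, if_neg h12, if_neg heq]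
            simp [PySem.Dict.getD, ihDn m hm (by omega)]
    rcases eq_or_lt_of_le hj1 with rfl | hjt
    · by_cases h12 : t = 12
      · unfold altStep
        rw [if_pos h12]
        rw [PySem.Dict.get?_insert_self, h12, get_of_12]
      · unfold altStep
        rw [if_neg h12]
        rw [PySem.Dict.get?_insert_self,
            hval (t + 1) (by omega), hval (t + 2) (by omega), hval (2 * t) (by omega),
            show (2 : Int) * t = t * 2 by ring,
            ← get_unfold t k h1 hj2 h12]
    · have hne : j ≠ t := by omega
      unfold altStep
      split
      · rw [PySem.Dict.get?_insert_of_ne _ _ hne, ihDn j (by omega) hj2]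
      · rw [PySem.Dict.get?_insert_of_ne _ _ hne, ihDn j (by omega) hj2]

-- ===== VERDICT (by name: the statement is the Claim_ definition above) =====
theorem get_spec : Claim_equal_get := by
  intro n k _ hpre
  unfold Spec_get get_alt
  by_cases hgt : n > k
  · rw [if_pos hgt, get_of_gt n k hgt]
  · by_cases h12 : n = 12
    · rw [if_neg hgt, if_pos h12, h12, get_of_12]
    · by_cases heq : n = k
      · rw [if_neg hgt, if_neg h12, if_pos heq, heq, get_of_eq k (by omega : k ≠ 12)]
      · have h1 : 1 ≤ n := by
          rcases hpre with h | h
          · exact h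
          · exact absurd (by omega : n = k) heq
        rw [if_neg hgt, if_neg h12, if_neg heq]
        have := fold_inv k (k - n).toNat n h1 (by omega) n le_rfl (by omega)
        simp [PySem.Dict.getD, this]
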